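-- pv_equiv track=rewrite | github.com/cincinnat/rosalind | tools/dist.py | edit_matrix
-- ===== SOURCE A (Python) =====
-- import collections
-- import itertools
--
-- def edit_matrix(s1, s2, indel_weight=1, substitution_weight=1):
--     Cell = collections.namedtuple('Arrow', ['arrow', 'dist'])
--
--     def weight(u, v):
--         if u[0] != v[0] and u[1] != v[1]:
--             # The short version
--             #     (s1[..] != s2[..]) * substitution_weight
--             # will not work if `substitution_weight` is an infinity
--             # because `inf * 0` gives nan.
--             #
--             if s1[u[0]] != s2[u[1]]:
--                 return substitution_weight
--
--             return 0
--         return indel_weight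
--
--     dist = dict()
--     for v in itertools.product(range(len(s1)+1), range(len(s2)+1)):
--         i, j = v
--         if i == 0 and j == 0:
--             dist[v] = Cell(v, 0)
--         elif i == 0:
--             u = (i, j-1)
--             dist[v] = Cell(u, weight(u, v) + dist[u].dist)
--         elif j == 0:
--             u = (i-1, j)
--             dist[v] = Cell(u, weight(u, v) + dist[u].dist)
--         else:
--             parents = [(i-1, j), (i, j-1), (i-1, j-1)]
--             weights = [weight(u, v) + dist[u].dist for u in parents]
--             w = min(weights)
--             u = parents[weights.index(w)]
--             dist[v] = Cell(u, w)
--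
--     r1 = []
--     r2 = []
--     cur = v
--     while cur != (0, 0):
--         i, j = dist[cur].arrow
--         if i != cur[0] and j != cur[1]:
--             r1.append(s1[i])
--             r2.append(s2[j])
--         elif i != cur[0]:
--             r1.append(s1[i])
--             r2.append('-')
--         else:
--             r1.append('-')
--             r2.append(s2[j])
--         cur = dist[cur].arrow
--
--     return dist[v].dist, [''.join(reversed(r1)), ''.join(reversed(r2))]
-- ===== SOURCE B (Python) =====
-- def edit_matrix(s1, s2, indel_weight=1, substitution_weight=1):
--     # Single forward pass: every cell carries its cost together with the whole
--     # aligned-character chain of its chosen path (a shared cons chain), so the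
--     # answer is read straight off the corner cell -- no arrows, no traceback
--     # over the table.
--     def better(best, cand):
--         return cand if cand[0] < best[0] else best
--
--     prev = [(0, None)]
--     for j in range(1, len(s2) + 1):
--         c, t = prev[j - 1]
--         prev.append((c + indel_weight, (('-', s2[j - 1]), t)))
--     for i in range(1, len(s1) + 1):
--         c, t = prev[0]
--         row = [(c + indel_weight, ((s1[i - 1], '-'), t))]
--         for j in range(1, len(s2) + 1):
--             sub = 0 if s1[i - 1] == s2[j - 1] else substitution_weight
--             up = (prev[j][0] + indel_weight, ((s1[i - 1], '-'), prev[j][1]))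
--             left = (row[j - 1][0] + indel_weight, (('-', s2[j - 1]), row[j - 1][1]))
--             diag = (prev[j - 1][0] + sub, ((s1[i - 1], s2[j - 1]), prev[j - 1][1]))
--             row.append(better(better(up, left), diag))
--         prev = row
--     cost, chain = prev[-1]
--     r1, r2 = [], []
--     while chain is not None:
--         (c1, c2), chain = chain
--         r1.append(c1)
--         r2.append(c2)
--     return cost, [''.join(reversed(r1)), ''.join(reversed(r2))]
-- ===== Notes on version B (the rewrite author's own statement) =====
-- stated objective: alternative
-- what changed: B replaces A's two-phase scheme (forward dict of (arrow,dist) namedtuple cells followed by a while-loop traceback over the table re-reading s1/s2) by a single forward pass in which each cell carries its cost together with the full aligned-character chain of its chosen path as a shared persistent cons chain, so the result is read directly off the corner cell and the table is never revisited.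
import Mathlib
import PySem

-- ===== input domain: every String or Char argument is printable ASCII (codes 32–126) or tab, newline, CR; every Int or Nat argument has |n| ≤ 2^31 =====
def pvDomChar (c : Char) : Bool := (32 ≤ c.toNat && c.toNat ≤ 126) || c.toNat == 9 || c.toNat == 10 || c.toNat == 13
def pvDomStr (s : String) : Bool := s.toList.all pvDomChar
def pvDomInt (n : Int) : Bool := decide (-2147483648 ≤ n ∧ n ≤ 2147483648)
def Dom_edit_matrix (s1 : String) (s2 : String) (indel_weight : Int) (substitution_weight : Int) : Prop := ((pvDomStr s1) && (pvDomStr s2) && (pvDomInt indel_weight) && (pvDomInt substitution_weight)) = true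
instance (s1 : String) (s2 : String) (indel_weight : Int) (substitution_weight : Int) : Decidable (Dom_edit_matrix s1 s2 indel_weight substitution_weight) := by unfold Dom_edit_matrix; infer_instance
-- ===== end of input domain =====

-- B replaces A's forward pass that stores arrows plus a traceback over the table with ONE
-- forward pass whose cells carry (cost, full aligned-character chain of the chosen path) as a
-- shared cons chain; the answer is read off the corner cell. Objective: alternative.

-- ===== PORT A =====
-- weight(u, v) from A; string indices are always in range where A calls it.
def pvWeightA (s1 s2 : String) (iw sw : Int) (u v : Int × Int) : Int :=
  if u.1 ≠ v.1 ∧ u.2 ≠ v.2 then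
    if PySem.Str.pyGet? s1 u.1 ≠ PySem.Str.pyGet? s2 u.2 then sw else 0
  else iw

-- one iteration of A's `for v in itertools.product(...)` loop; the state is (dist, v).
-- `dist[u]` can never raise KeyError in A (u was inserted earlier), so `.getD` with a
-- dummy cell is exact here.
def pvStepA (s1 s2 : String) (iw sw : Int)
    (st : PySem.Dict (Int × Int) ((Int × Int) × Int) × (Int × Int)) (v : Int × Int) :
    PySem.Dict (Int × Int) ((Int × Int) × Int) × (Int × Int) :=
  let dist := st.1
  if v.1 = 0 ∧ v.2 = 0 then (dist.insert v (v, 0), v)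
  else if v.1 = 0 then
    let u := (v.1, v.2 - 1)
    (dist.insert v (u, pvWeightA s1 s2 iw sw u v + (dist.getD u ((0, 0), 0)).2), v)
  else if v.2 = 0 then
    let u := (v.1 - 1, v.2)
    (dist.insert v (u, pvWeightA s1 s2 iw sw u v + (dist.getD u ((0, 0), 0)).2), v)
  else
    let parents : List (Int × Int) := [(v.1 - 1, v.2), (v.1, v.2 - 1), (v.1 - 1, v.2 - 1)]
    let weights := parents.map (fun u => pvWeightA s1 s2 iw sw u v + (dist.getD u ((0, 0), 0)).2)
    let w := (PySem.List.min? weights (fun x => x)).getD 0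
    let u := (PySem.List.pyGet? parents (((PySem.List.index? weights w).getD 0 : Nat) : Int)).getD (0, 0)
    (dist.insert v (u, w), v)

-- A's `while cur != (0, 0)` traceback following the stored arrows; fuel (= len(s1)+len(s2),
-- an upper bound on the number of iterations) only makes the recursion total.
def pvTraceA (s1 s2 : String) (dist : PySem.Dict (Int × Int) ((Int × Int) × Int)) :
    Nat → (Int × Int) → List Char × List Char
  | 0, _ => ([], [])
  | fuel + 1, cur =>
    if cur = (0, 0) then ([], [])
    else
      let a := (dist.getD cur ((0, 0), 0)).1
      let p :=
        if a.1 ≠ cur.1 ∧ a.2 ≠ cur.2 then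
          ((PySem.Str.pyGet? s1 a.1).getD '-', (PySem.Str.pyGet? s2 a.2).getD '-')
        else if a.1 ≠ cur.1 then ((PySem.Str.pyGet? s1 a.1).getD '-', '-')
        else ('-', (PySem.Str.pyGet? s2 a.2).getD '-')
      let r := pvTraceA s1 s2 dist fuel a
      (p.1 :: r.1, p.2 :: r.2)

def edit_matrix (s1 : String) (s2 : String) (indel_weight : Int) (substitution_weight : Int) : Int × List String :=
  let n1 := PySem.Str.len s1
  let n2 := PySem.Str.len s2
  let prod := (PySem.List.pyRange 0 (n1 + 1) 1).flatMap
      (fun i => (PySem.List.pyRange 0 (n2 + 1) 1).map (fun j => (i, j)))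
  let res := prod.foldl (pvStepA s1 s2 indel_weight substitution_weight) (PySem.Dict.empty, (0, 0))
  let dist := res.1
  let v := res.2
  let tr := pvTraceA s1 s2 dist (s1.toList.length + s2.toList.length) v
  ((dist.getD v ((0, 0), 0)).2, [String.ofList tr.1.reverse, String.ofList tr.2.reverse])

-- ===== PORT B =====
-- `better(best, cand)` from B: keep `best` unless `cand` is strictly cheaper.
def pvBetter (best cand : Int × List (Char × Char)) : Int × List (Char × Char) :=
  if cand.1 < best.1 then cand else best

-- B's first loop: row 0, built left to right (None chain → [], cons pair → List.cons).
def pvRow0B (s2 : String) (iw : Int) : List (Int × List (Char × Char)) :=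
  (PySem.List.pyRange 1 (PySem.Str.len s2 + 1) 1).foldl
    (fun prev j =>
      let p := (PySem.List.pyGet? prev (j - 1)).getD (0, [])
      prev ++ [(p.1 + iw, ('-', (PySem.Str.pyGet? s2 (j - 1)).getD '-') :: p.2)])
    [(0, [])]

-- B's inner `for j` loop building row i from the previous row.
def pvRowB (s1 s2 : String) (iw sw : Int) (prev : List (Int × List (Char × Char))) (i : Int) :
    List (Int × List (Char × Char)) :=
  (PySem.List.pyRange 1 (PySem.Str.len s2 + 1) 1).foldl
    (fun row j =>
      let sub := if PySem.Str.pyGet? s1 (i - 1) = PySem.Str.pyGet? s2 (j - 1) then 0 else sw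
      let pj := (PySem.List.pyGet? prev j).getD (0, [])
      let pj1 := (PySem.List.pyGet? prev (j - 1)).getD (0, [])
      let rj1 := (PySem.List.pyGet? row (j - 1)).getD (0, [])
      let c1 := (PySem.Str.pyGet? s1 (i - 1)).getD '-'
      let c2 := (PySem.Str.pyGet? s2 (j - 1)).getD '-'
      let up := (pj.1 + iw, (c1, '-') :: pj.2)
      let left := (rj1.1 + iw, ('-', c2) :: rj1.2)
      let diag := (pj1.1 + sub, (c1, c2) :: pj1.2)
      row ++ [pvBetter (pvBetter up left) diag])
    [(((PySem.List.pyGet? prev 0).getD (0, [])).1 + iw,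
      ((PySem.Str.pyGet? s1 (i - 1)).getD '-', '-') :: ((PySem.List.pyGet? prev 0).getD (0, [])).2)]

-- B's final `while chain is not None` loop collecting the two character lists.
def pvWalkB : List (Char × Char) → List Char × List Char
  | [] => ([], [])
  | p :: t =>
    let r := pvWalkB t
    (p.1 :: r.1, p.2 :: r.2)

def edit_matrix_alt (s1 : String) (s2 : String) (indel_weight : Int) (substitution_weight : Int) : Int × List String :=
  let prev := (PySem.List.pyRange 1 (PySem.Str.len s1 + 1) 1).foldl
      (fun prev i => pvRowB s1 s2 indel_weight substitution_weight prev i)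
      (pvRow0B s2 indel_weight)
  let last := (PySem.List.pyGet? prev (-1)).getD (0, [])
  let w := pvWalkB last.2
  (last.1, [String.ofList w.1.reverse, String.ofList w.2.reverse])

-- ===== PRECONDITION & SPEC =====
def Spec_edit_matrix (s1 : String) (s2 : String) (indel_weight : Int) (substitution_weight : Int) (out : Int × List String) : Prop := out = edit_matrix_alt s1 s2 indel_weight substitution_weight
instance (s1 : String) (s2 : String) (indel_weight : Int) (substitution_weight : Int) (out : Int × List String) : Decidable (Spec_edit_matrix s1 s2 indel_weight substitution_weight out) := by unfold Spec_edit_matrix; infer_instance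

-- ===== CLAIM (what is proved, stated in full; the proofs are below) =====
def Claim_equal_edit_matrix : Prop := ∀ (s1 : String) (s2 : String) (indel_weight : Int) (substitution_weight : Int), Dom_edit_matrix s1 s2 indel_weight substitution_weight → Spec_edit_matrix s1 s2 indel_weight substitution_weight (edit_matrix s1 s2 indel_weight substitution_weight)

-- ===== LEMMAS AND PROOFS =====

-- The common specification of the DP table: substitution cost, cell cost, A's arrow,
-- and the aligned-character chain of the chosen path (most recent move first).
def pvSub (s1 s2 : String) (sw : Int) (i j : Nat) : Int :=
  if PySem.Str.pyGet? s1 (i : Int) ≠ PySem.Str.pyGet? s2 (j : Int) then sw else 0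

def pvD (s1 s2 : String) (iw sw : Int) : Nat → Nat → Int
  | 0, 0 => 0
  | 0, j + 1 => iw + pvD s1 s2 iw sw 0 j
  | i + 1, 0 => iw + pvD s1 s2 iw sw i 0
  | i + 1, j + 1 =>
    min (min (iw + pvD s1 s2 iw sw i (j + 1)) (iw + pvD s1 s2 iw sw (i + 1) j))
        (pvSub s1 s2 sw i j + pvD s1 s2 iw sw i j)

def pvArrow (s1 s2 : String) (iw sw : Int) : Nat → Nat → Int × Int
  | 0, 0 => (0, 0)
  | 0, j + 1 => (0, (j : Int))
  | i + 1, 0 => ((i : Int), 0)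
  | i + 1, j + 1 =>
    let w := pvD s1 s2 iw sw (i + 1) (j + 1)
    if iw + pvD s1 s2 iw sw i (j + 1) = w then ((i : Int), (j : Int) + 1)
    else if iw + pvD s1 s2 iw sw (i + 1) j = w then ((i : Int) + 1, (j : Int))
    else ((i : Int), (j : Int))

def pvSpecCell (s1 s2 : String) (iw sw : Int) (i j : Nat) : (Int × Int) × Int :=
  (pvArrow s1 s2 iw sw i j, pvD s1 s2 iw sw i j)

def pvS1 (s1 : String) (i : Nat) : Char := (PySem.Str.pyGet? s1 (i : Int)).getD '-'

def pvChain (s1 s2 : String) (iw sw : Int) : Nat → Nat → List (Char × Char)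
  | 0, 0 => []
  | 0, j + 1 => ('-', pvS1 s2 j) :: pvChain s1 s2 iw sw 0 j
  | i + 1, 0 => (pvS1 s1 i, '-') :: pvChain s1 s2 iw sw i 0
  | i + 1, j + 1 =>
    let w := pvD s1 s2 iw sw (i + 1) (j + 1)
    if iw + pvD s1 s2 iw sw i (j + 1) = w then (pvS1 s1 i, '-') :: pvChain s1 s2 iw sw i (j + 1)
    else if iw + pvD s1 s2 iw sw (i + 1) j = w then ('-', pvS1 s2 j) :: pvChain s1 s2 iw sw (i + 1) j
    else (pvS1 s1 i, pvS1 s2 j) :: pvChain s1 s2 iw sw i j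

def pvCell (s1 s2 : String) (iw sw : Int) (i j : Nat) : Int × List (Char × Char) :=
  (pvD s1 s2 iw sw i j, pvChain s1 s2 iw sw i j)

theorem pv_mapRange_get {α : Type} (f : Nat → α) (n k : Nat) (d : α) (h : k < n) :
    (PySem.List.pyGet? ((List.range n).map f) ((k : Nat) : Int)).getD d = f k := by
  rw [PySem.List.pyGet?_natCast]
  simp [h]

theorem pv_pair_ext (a b : Int) (c d : List (Char × Char)) (h1 : a = b) (h2 : c = d) :
    (a, c) = (b, d) := by rw [h1, h2]

-- `better(better(up, left), diag)` picks the cost minimum and, on ties, the first of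
-- up, left, diag — exactly A's `parents[weights.index(min(weights))]`.
theorem pv_better3 (wu wl wd : Int) (cu cl cd : List (Char × Char)) :
    pvBetter (pvBetter (wu, cu) (wl, cl)) (wd, cd)
      = (min (min wu wl) wd,
         if wu = min (min wu wl) wd then cu
         else if wl = min (min wu wl) wd then cl else cd) := by
  unfold pvBetter
  by_cases h1 : wl < wu
  · rw [if_pos h1]
    by_cases h2 : wd < wl
    · rw [if_pos h2, if_neg (by omega), if_neg (by omega)]
      simp only [Prod.mk.injEq]
      exact ⟨by omega, trivial⟩
    · rw [if_neg h2, if_neg (by omega), if_pos (by omega)]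
      simp only [Prod.mk.injEq]
      exact ⟨by omega, trivial⟩
  · rw [if_neg h1]
    by_cases h2 : wd < wu
    · rw [if_pos h2, if_neg (by omega), if_neg (by omega)]
      simp only [Prod.mk.injEq]
      exact ⟨by omega, trivial⟩
    · rw [if_neg h2, if_pos (by omega)]
      simp only [Prod.mk.injEq]
      exact ⟨by omega, trivial⟩

theorem pv_row0B_spec (s2 : String) (iw sw : Int) (s1 : String) (n2 : Nat)
    (hn2 : n2 = s2.toList.length) :
    pvRow0B s2 iw = (List.range (n2 + 1)).map (fun j => pvCell s1 s2 iw sw 0 j) := by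
  have key : ∀ t : Nat, t ≤ n2 →
      ((PySem.List.pyRange 1 ((t : Int) + 1) 1).foldl
        (fun prev j =>
          let p := (PySem.List.pyGet? prev (j - 1)).getD (0, [])
          prev ++ [(p.1 + iw, ('-', (PySem.Str.pyGet? s2 (j - 1)).getD '-') :: p.2)])
        [(0, [])])
      = (List.range (t + 1)).map (fun j => pvCell s1 s2 iw sw 0 j) := by
    intro t ht
    induction t with
    | zero =>
      rw [PySem.List.pyRange_one_eq_nil (by norm_num)]
      simp [pvCell, pvD, pvChain]
    | succ k ih =>
      have hsplit : PySem.List.pyRange 1 ((k : Int) + 1 + 1) 1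
          = PySem.List.pyRange 1 ((k : Int) + 1) 1 ++ [(k : Int) + 1] :=
        PySem.List.pyRange_one_succ_right (by omega)
      have hc : ((k + 1 : Nat) : Int) + 1 = (k : Int) + 1 + 1 := by push_cast; ring
      rw [hc, hsplit, List.foldl_append, ih (by omega)]
      simp only [List.foldl_cons, List.foldl_nil]
      have e2 : (((k : Int) + 1) - 1) = ((k : Nat) : Int) := by ring
      rw [e2, pv_mapRange_get (fun j => pvCell s1 s2 iw sw 0 j) (k + 1) k (0, []) (by omega)]
      rw [show List.range (k + 1 + 1) = List.range (k + 1) ++ [k + 1] from List.range_succ,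
        List.map_append]
      congr 1
      simp only [List.map_cons, List.map_nil]
      congr 1
      show (pvD s1 s2 iw sw 0 k + iw,
            ('-', (PySem.Str.pyGet? s2 ((k : Nat) : Int)).getD '-') :: pvChain s1 s2 iw sw 0 k)
          = (pvD s1 s2 iw sw 0 (k + 1), pvChain s1 s2 iw sw 0 (k + 1))
      refine pv_pair_ext _ _ _ _ ?_ ?_
      · rw [show pvD s1 s2 iw sw 0 (k + 1) = iw + pvD s1 s2 iw sw 0 k from by simp [pvD]]
        ring
      · simp [pvChain, pvS1]
  have h0 := key n2 (le_refl n2)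
  unfold pvRow0B
  simp only [PySem.Str.len_eq]
  rw [← hn2]
  exact h0

theorem pv_rowB_spec (s1 s2 : String) (iw sw : Int) (n2 : Nat) (hn2 : n2 = s2.toList.length)
    (m : Nat) :
    pvRowB s1 s2 iw sw ((List.range (n2 + 1)).map (fun j => pvCell s1 s2 iw sw m j)) ((m : Int) + 1)
      = (List.range (n2 + 1)).map (fun j => pvCell s1 s2 iw sw (m + 1) j) := by
  have e1 : (((m : Int) + 1) - 1) = ((m : Nat) : Int) := by ring
  have key : ∀ t : Nat, t ≤ n2 →
      ((PySem.List.pyRange 1 ((t : Int) + 1) 1).foldl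
        (fun row j =>
          let sub := if PySem.Str.pyGet? s1 (((m : Int) + 1) - 1) = PySem.Str.pyGet? s2 (j - 1) then 0 else sw
          let pj := (PySem.List.pyGet? ((List.range (n2 + 1)).map (fun j => pvCell s1 s2 iw sw m j)) j).getD (0, [])
          let pj1 := (PySem.List.pyGet? ((List.range (n2 + 1)).map (fun j => pvCell s1 s2 iw sw m j)) (j - 1)).getD (0, [])
          let rj1 := (PySem.List.pyGet? row (j - 1)).getD (0, [])
          let c1 := (PySem.Str.pyGet? s1 (((m : Int) + 1) - 1)).getD '-'
          let c2 := (PySem.Str.pyGet? s2 (j - 1)).getD '-'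
          let up := (pj.1 + iw, (c1, '-') :: pj.2)
          let left := (rj1.1 + iw, ('-', c2) :: rj1.2)
          let diag := (pj1.1 + sub, (c1, c2) :: pj1.2)
          row ++ [pvBetter (pvBetter up left) diag])
        [(((PySem.List.pyGet? ((List.range (n2 + 1)).map (fun j => pvCell s1 s2 iw sw m j)) 0).getD (0, [])).1 + iw,
          ((PySem.Str.pyGet? s1 (((m : Int) + 1) - 1)).getD '-', '-')
            :: ((PySem.List.pyGet? ((List.range (n2 + 1)).map (fun j => pvCell s1 s2 iw sw m j)) 0).getD (0, [])).2)])
      = (List.range (t + 1)).map (fun j => pvCell s1 s2 iw sw (m + 1) j) := by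
    intro t ht
    induction t with
    | zero =>
      rw [PySem.List.pyRange_one_eq_nil (by norm_num)]
      simp only [List.foldl_nil]
      have hz : (PySem.List.pyGet? ((List.range (n2 + 1)).map (fun j => pvCell s1 s2 iw sw m j))
          (0 : Int)).getD (0, ([] : List (Char × Char))) = pvCell s1 s2 iw sw m 0 := by
        have h := pv_mapRange_get (fun j => pvCell s1 s2 iw sw m j) (n2 + 1) 0 (0, []) (by omega)
        simpa using h
      rw [hz, e1]
      rw [show List.range (0 + 1) = [0] from rfl]
      simp only [List.map_cons, List.map_nil]
      congr 1
      show (pvD s1 s2 iw sw m 0 + iw,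
            ((PySem.Str.pyGet? s1 ((m : Nat) : Int)).getD '-', '-') :: pvChain s1 s2 iw sw m 0)
          = (pvD s1 s2 iw sw (m + 1) 0, pvChain s1 s2 iw sw (m + 1) 0)
      refine pv_pair_ext _ _ _ _ ?_ ?_
      · rw [show pvD s1 s2 iw sw (m + 1) 0 = iw + pvD s1 s2 iw sw m 0 from by simp [pvD]]
        ring
      · simp [pvChain, pvS1]
    | succ k ih =>
      have hsplit : PySem.List.pyRange 1 ((k : Int) + 1 + 1) 1
          = PySem.List.pyRange 1 ((k : Int) + 1) 1 ++ [(k : Int) + 1] :=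
        PySem.List.pyRange_one_succ_right (by omega)
      have hc : ((k + 1 : Nat) : Int) + 1 = (k : Int) + 1 + 1 := by push_cast; ring
      rw [hc, hsplit, List.foldl_append, ih (by omega)]
      simp only [List.foldl_cons, List.foldl_nil]
      have e2 : (((k : Int) + 1) - 1) = ((k : Nat) : Int) := by ring
      have e3 : ((k : Int) + 1) = ((k + 1 : Nat) : Int) := by push_cast; ring
      rw [e1, e2, e3,
        pv_mapRange_get (fun j => pvCell s1 s2 iw sw m j) (n2 + 1) (k + 1) (0, []) (by omega),
        pv_mapRange_get (fun j => pvCell s1 s2 iw sw m j) (n2 + 1) k (0, []) (by omega),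
        pv_mapRange_get (fun j => pvCell s1 s2 iw sw (m + 1) j) (k + 1) k (0, []) (by omega)]
      rw [show List.range (k + 1 + 1) = List.range (k + 1) ++ [k + 1] from List.range_succ,
        List.map_append]
      congr 1
      simp only [List.map_cons, List.map_nil]
      congr 1
      -- the new cell
      show pvBetter (pvBetter
            (pvD s1 s2 iw sw m (k + 1) + iw, (pvS1 s1 m, '-') :: pvChain s1 s2 iw sw m (k + 1))
            (pvD s1 s2 iw sw (m + 1) k + iw, ('-', pvS1 s2 k) :: pvChain s1 s2 iw sw (m + 1) k))
          (pvD s1 s2 iw sw m k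
              + (if PySem.Str.pyGet? s1 ((m : Nat) : Int) = PySem.Str.pyGet? s2 ((k : Nat) : Int) then 0 else sw),
            (pvS1 s1 m, pvS1 s2 k) :: pvChain s1 s2 iw sw m k)
          = (pvD s1 s2 iw sw (m + 1) (k + 1), pvChain s1 s2 iw sw (m + 1) (k + 1))
      have hsubeq :
          (if PySem.Str.pyGet? s1 ((m : Nat) : Int) = PySem.Str.pyGet? s2 ((k : Nat) : Int) then (0 : Int) else sw)
            = pvSub s1 s2 sw m k := by
        unfold pvSub
        by_cases hch : PySem.Str.pyGet? s1 ((m : Nat) : Int) = PySem.Str.pyGet? s2 ((k : Nat) : Int)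
        · simp [hch]
        · simp [hch]
      rw [hsubeq]
      have hcom1 : pvD s1 s2 iw sw m (k + 1) + iw = iw + pvD s1 s2 iw sw m (k + 1) := by ring
      have hcom2 : pvD s1 s2 iw sw (m + 1) k + iw = iw + pvD s1 s2 iw sw (m + 1) k := by ring
      have hcom3 : pvD s1 s2 iw sw m k + pvSub s1 s2 sw m k
          = pvSub s1 s2 sw m k + pvD s1 s2 iw sw m k := by ring
      rw [hcom1, hcom2, hcom3]
      rw [pv_better3 (iw + pvD s1 s2 iw sw m (k + 1)) (iw + pvD s1 s2 iw sw (m + 1) k)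
        (pvSub s1 s2 sw m k + pvD s1 s2 iw sw m k)
        ((pvS1 s1 m, '-') :: pvChain s1 s2 iw sw m (k + 1))
        (('-', pvS1 s2 k) :: pvChain s1 s2 iw sw (m + 1) k)
        ((pvS1 s1 m, pvS1 s2 k) :: pvChain s1 s2 iw sw m k)]
      have hD : pvD s1 s2 iw sw (m + 1) (k + 1)
          = min (min (iw + pvD s1 s2 iw sw m (k + 1)) (iw + pvD s1 s2 iw sw (m + 1) k))
                (pvSub s1 s2 sw m k + pvD s1 s2 iw sw m k) := by
        simp [pvD]
      rw [← hD]
      refine pv_pair_ext _ _ _ _ rfl ?_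
      by_cases h1 : iw + pvD s1 s2 iw sw m (k + 1) = pvD s1 s2 iw sw (m + 1) (k + 1)
      · rw [if_pos h1]
        simp [pvChain, h1]
      · rw [if_neg h1]
        by_cases h2 : iw + pvD s1 s2 iw sw (m + 1) k = pvD s1 s2 iw sw (m + 1) (k + 1)
        · rw [if_pos h2]
          simp [pvChain, h1, h2]
        · rw [if_neg h2]
          simp [pvChain, h1, h2]
  have h0 := key n2 (le_refl n2)
  unfold pvRowB
  simp only [PySem.Str.len_eq]
  rw [← hn2]
  exact h0

theorem pv_foldB_spec (s1 s2 : String) (iw sw : Int) (n1 n2 : Nat)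
    (hn1 : n1 = s1.toList.length) (hn2 : n2 = s2.toList.length) :
    ((PySem.List.pyRange 1 (PySem.Str.len s1 + 1) 1).foldl
        (fun prev i => pvRowB s1 s2 iw sw prev i) (pvRow0B s2 iw))
      = (List.range (n2 + 1)).map (fun j => pvCell s1 s2 iw sw n1 j) := by
  have key : ∀ m : Nat, m ≤ n1 →
      ((PySem.List.pyRange 1 ((m : Int) + 1) 1).foldl
        (fun prev i => pvRowB s1 s2 iw sw prev i) (pvRow0B s2 iw))
      = (List.range (n2 + 1)).map (fun j => pvCell s1 s2 iw sw m j) := by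
    intro m hm
    induction m with
    | zero =>
      rw [show PySem.List.pyRange 1 (((0 : Nat) : Int) + 1) 1 = [] from
        PySem.List.pyRange_one_eq_nil (by simp)]
      simpa using pv_row0B_spec s2 iw sw s1 n2 hn2
    | succ k ih =>
      have hsplit : PySem.List.pyRange 1 ((k : Int) + 1 + 1) 1
          = PySem.List.pyRange 1 ((k : Int) + 1) 1 ++ [(k : Int) + 1] :=
        PySem.List.pyRange_one_succ_right (by omega)
      have hc : ((k + 1 : Nat) : Int) + 1 = (k : Int) + 1 + 1 := by push_cast; ring
      rw [hc, hsplit, List.foldl_append, ih (by omega)]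
      simp only [List.foldl_cons, List.foldl_nil]
      exact pv_rowB_spec s1 s2 iw sw n2 hn2 k
  have h0 := key n1 (le_refl n1)
  rw [PySem.Str.len_eq, ← hn1]
  exact h0

theorem pv_walkB_spec (c : List (Char × Char)) :
    pvWalkB c = (c.map Prod.fst, c.map Prod.snd) := by
  induction c with
  | nil => rfl
  | cons p t ih => simp [pvWalkB, ih]

theorem pv_pick3 (p1 p2 p3 : Int × Int) (w1 w2 w3 : Int) :
    (PySem.List.min? [w1, w2, w3] (fun x => x)).getD 0 = min (min w1 w2) w3 ∧
    (PySem.List.pyGet? [p1, p2, p3]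
        (((PySem.List.index? [w1, w2, w3] (min (min w1 w2) w3)).getD 0 : Nat) : Int)).getD (0, 0)
      = (if w1 = min (min w1 w2) w3 then p1
         else if w2 = min (min w1 w2) w3 then p2 else p3) := by
  constructor
  · rw [PySem.List.min?_id_cons]
    simp [List.foldl, min_assoc]
  · set w := min (min w1 w2) w3 with hw
    by_cases h1 : w1 = w
    · rw [if_pos h1, ← h1, PySem.List.index?_cons_self]
      simp [PySem.List.pyGet?, PySem.List.pyIdx?]
    · rw [if_neg h1, PySem.List.index?_cons_of_ne _ (by exact h1)]
      by_cases h2 : w2 = w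
      · rw [if_pos h2, ← h2, PySem.List.index?_cons_self]
        simp [PySem.List.pyGet?, PySem.List.pyIdx?]
      · rw [if_neg h2, PySem.List.index?_cons_of_ne _ (by exact h2)]
        have h3 : w3 = w := by omega
        rw [← h3, PySem.List.index?_cons_self]
        simp [PySem.List.pyGet?, PySem.List.pyIdx?]

theorem pv_stepA_value (s1 s2 : String) (iw sw : Int) (i t : Nat)
    (d : PySem.Dict (Int × Int) ((Int × Int) × Int)) (v0 : Int × Int)
    (hup : 1 ≤ i → d.get? (((i - 1 : Nat) : Int), (t : Int)) = some (pvSpecCell s1 s2 iw sw (i - 1) t))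
    (hleft : 1 ≤ t → d.get? ((i : Int), ((t - 1 : Nat) : Int)) = some (pvSpecCell s1 s2 iw sw i (t - 1)))
    (hdiag : 1 ≤ i → 1 ≤ t → d.get? (((i - 1 : Nat) : Int), ((t - 1 : Nat) : Int)) = some (pvSpecCell s1 s2 iw sw (i - 1) (t - 1))) :
    pvStepA s1 s2 iw sw (d, v0) ((i : Int), (t : Int))
      = (d.insert ((i : Int), (t : Int)) (pvSpecCell s1 s2 iw sw i t), ((i : Int), (t : Int))) := by
  rcases i with _ | i <;> rcases t with _ | t
  · simp [pvStepA, pvSpecCell, pvArrow, pvD]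
  · have hL := hleft (by omega)
    simp only [Nat.add_sub_cancel] at hL
    unfold pvStepA
    simp only []
    rw [if_neg (by omega), if_pos (by omega)]
    have e : ((t + 1 : Nat) : Int) - 1 = (t : Int) := by push_cast; ring
    simp only [e]
    rw [PySem.Dict.getD_eq_get?_getD, hL]
    unfold pvWeightA pvSpecCell pvArrow
    rw [if_neg (by simp)]
    simp [pvD]
  · have hU := hup (by omega)
    simp only [Nat.add_sub_cancel] at hU
    unfold pvStepA
    simp only []
    rw [if_neg (by omega), if_neg (by omega), if_pos (by omega)]
    have e : ((i + 1 : Nat) : Int) - 1 = (i : Int) := by push_cast; ring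
    simp only [e]
    rw [PySem.Dict.getD_eq_get?_getD, hU]
    unfold pvWeightA pvSpecCell pvArrow
    rw [if_neg (by simp)]
    simp [pvD]
  · have hU := hup (by omega)
    have hL := hleft (by omega)
    have hD := hdiag (by omega) (by omega)
    simp only [Nat.add_sub_cancel] at hU hL hD
    unfold pvStepA
    simp only []
    rw [if_neg (by omega), if_neg (by omega), if_neg (by omega)]
    have e1 : ((i + 1 : Nat) : Int) - 1 = (i : Int) := by push_cast; ring
    have e2 : ((t + 1 : Nat) : Int) - 1 = (t : Int) := by push_cast; ring
    simp only [e1, e2, List.map_cons, List.map_nil]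
    rw [PySem.Dict.getD_eq_get?_getD, PySem.Dict.getD_eq_get?_getD, PySem.Dict.getD_eq_get?_getD,
        hU, hL, hD]
    have w1eq : pvWeightA s1 s2 iw sw ((i : Int), ((t + 1 : Nat) : Int)) (((i + 1 : Nat) : Int), ((t + 1 : Nat) : Int)) = iw := by
      unfold pvWeightA
      rw [if_neg (by omega)]
    have w2eq : pvWeightA s1 s2 iw sw (((i + 1 : Nat) : Int), (t : Int)) (((i + 1 : Nat) : Int), ((t + 1 : Nat) : Int)) = iw := by
      unfold pvWeightA
      rw [if_neg (by omega)]
    have w3eq : pvWeightA s1 s2 iw sw ((i : Int), (t : Int)) (((i + 1 : Nat) : Int), ((t + 1 : Nat) : Int)) = pvSub s1 s2 sw i t := by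
      unfold pvWeightA pvSub
      rw [if_pos (by constructor <;> omega)]
    simp only [w1eq, w2eq, w3eq, Option.getD_some]
    have hmin := pv_pick3 ((i : Int), ((t + 1 : Nat) : Int)) (((i + 1 : Nat) : Int), (t : Int)) ((i : Int), (t : Int))
      (iw + (pvSpecCell s1 s2 iw sw i (t + 1)).2) (iw + (pvSpecCell s1 s2 iw sw (i + 1) t).2)
      (pvSub s1 s2 sw i t + (pvSpecCell s1 s2 iw sw i t).2)
    rw [hmin.1, hmin.2]
    have hval : min (min (iw + (pvSpecCell s1 s2 iw sw i (t + 1)).2) (iw + (pvSpecCell s1 s2 iw sw (i + 1) t).2))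
        (pvSub s1 s2 sw i t + (pvSpecCell s1 s2 iw sw i t).2) = pvD s1 s2 iw sw (i + 1) (t + 1) := by
      simp [pvSpecCell, pvD]
    rw [hval]
    unfold pvSpecCell
    have harr : pvArrow s1 s2 iw sw (i + 1) (t + 1)
        = (if iw + pvD s1 s2 iw sw i (t + 1) = pvD s1 s2 iw sw (i + 1) (t + 1) then ((i : Int), ((t + 1 : Nat) : Int))
           else if iw + pvD s1 s2 iw sw (i + 1) t = pvD s1 s2 iw sw (i + 1) (t + 1) then (((i + 1 : Nat) : Int), (t : Int))
           else ((i : Int), (t : Int))) := by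
      simp only [pvArrow]
      push_cast
      rfl
    rw [harr]

theorem pv_rowA_aux (s1 s2 : String) (iw sw : Int) (n2 : Nat) (i : Nat)
    (d : PySem.Dict (Int × Int) ((Int × Int) × Int)) (v0 : Int × Int)
    (hprev : 1 ≤ i → ∀ j' ≤ n2, d.get? (((i - 1 : Nat) : Int), (j' : Int)) = some (pvSpecCell s1 s2 iw sw (i - 1) j'))
    (t : Nat) (ht : t ≤ n2 + 1) :
    ((((PySem.List.pyRange 0 (t : Int) 1).map (fun j => ((i : Int), j))).foldl
        (pvStepA s1 s2 iw sw) (d, v0)).2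
      = if t = 0 then v0 else ((i : Int), ((t - 1 : Nat) : Int))) ∧
    (∀ j < t, (((PySem.List.pyRange 0 (t : Int) 1).map (fun j => ((i : Int), j))).foldl
        (pvStepA s1 s2 iw sw) (d, v0)).1.get? ((i : Int), (j : Int)) = some (pvSpecCell s1 s2 iw sw i j)) ∧
    (∀ k : Int × Int, k.1 ≠ (i : Int) → (((PySem.List.pyRange 0 (t : Int) 1).map (fun j => ((i : Int), j))).foldl
        (pvStepA s1 s2 iw sw) (d, v0)).1.get? k = d.get? k) := by
  induction t with
  | zero =>
    rw [show PySem.List.pyRange 0 ((0 : Nat) : Int) 1 = [] from by simp [PySem.List.pyRange_one_eq_nil]]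
    simp
  | succ t ih =>
    have ht' : t ≤ n2 + 1 := by omega
    obtain ⟨ih1, ih2, ih3⟩ := ih ht'
    have hsplit : PySem.List.pyRange 0 ((t + 1 : Nat) : Int) 1
        = PySem.List.pyRange 0 ((t : Nat) : Int) 1 ++ [(t : Int)] := by
      rw [show ((t + 1 : Nat) : Int) = (t : Int) + 1 by push_cast; ring]
      exact PySem.List.pyRange_one_succ_right (by omega)
    rw [hsplit, List.map_append, List.foldl_append]
    simp only [List.map_cons, List.map_nil, List.foldl_cons, List.foldl_nil]
    set res := (((PySem.List.pyRange 0 ((t : Nat) : Int) 1).map (fun j => ((i : Int), j))).foldl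
        (pvStepA s1 s2 iw sw) (d, v0)) with hres
    have hstep : pvStepA s1 s2 iw sw res ((i : Int), (t : Int))
        = (res.1.insert ((i : Int), (t : Int)) (pvSpecCell s1 s2 iw sw i t), ((i : Int), (t : Int))) := by
      rw [show res = (res.1, res.2) from rfl]
      exact pv_stepA_value s1 s2 iw sw i t res.1 res.2
        (fun hi => by
          rw [ih3 (((i - 1 : Nat) : Int), (t : Int)) (by simp only []; exact_mod_cast fun h => absurd (by exact_mod_cast h : i - 1 = i) (by omega))]
          exact hprev hi t (by omega))
        (fun htt => ih2 (t - 1) (by omega))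
        (fun hi htt => by
          rw [ih3 (((i - 1 : Nat) : Int), ((t - 1 : Nat) : Int)) (by simp only []; exact_mod_cast fun h => absurd (by exact_mod_cast h : i - 1 = i) (by omega))]
          exact hprev hi (t - 1) (by omega))
    rw [hstep]
    refine ⟨by simp, ?_, ?_⟩
    · intro j hj
      show (res.1.insert ((i : Int), (t : Int)) (pvSpecCell s1 s2 iw sw i t)).get? ((i : Int), (j : Int))
          = some (pvSpecCell s1 s2 iw sw i j)
      by_cases hjt : j = t
      · subst hjt
        simp [PySem.Dict.get?_insert_self]
      · rw [PySem.Dict.get?_insert_of_ne _ _ (show ((i : Int), (j : Int)) ≠ ((i : Int), (t : Int)) by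
          simp only [ne_eq, Prod.mk.injEq, not_and]
          intro _
          exact_mod_cast fun h => hjt (by exact_mod_cast h))]
        exact ih2 j (by omega)
    · intro k hk
      show (res.1.insert ((i : Int), (t : Int)) (pvSpecCell s1 s2 iw sw i t)).get? k = d.get? k
      rw [PySem.Dict.get?_insert_of_ne _ _ (show k ≠ ((i : Int), (t : Int)) by
        intro hkk
        exact hk (by rw [hkk]))]
      exact ih3 k hk

theorem pv_foldA_aux (s1 s2 : String) (iw sw : Int) (n1 n2 : Nat)
    (m : Nat) (hm : m ≤ n1 + 1) :
    (1 ≤ m → (((PySem.List.pyRange 0 (m : Int) 1).flatMap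
        (fun ii => (PySem.List.pyRange 0 ((n2 : Int) + 1) 1).map (fun j => (ii, j)))).foldl
        (pvStepA s1 s2 iw sw) (PySem.Dict.empty, ((0 : Int), (0 : Int)))).2 = (((m - 1 : Nat) : Int), (n2 : Int))) ∧
    (∀ i' < m, ∀ j ≤ n2, (((PySem.List.pyRange 0 (m : Int) 1).flatMap
        (fun ii => (PySem.List.pyRange 0 ((n2 : Int) + 1) 1).map (fun j => (ii, j)))).foldl
        (pvStepA s1 s2 iw sw) (PySem.Dict.empty, ((0 : Int), (0 : Int)))).1.get? ((i' : Int), (j : Int))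
        = some (pvSpecCell s1 s2 iw sw i' j)) := by
  induction m with
  | zero =>
    rw [show PySem.List.pyRange 0 ((0 : Nat) : Int) 1 = [] from by simp [PySem.List.pyRange_one_eq_nil]]
    exact ⟨fun h => absurd h (by omega), fun i' hi' => absurd hi' (by omega)⟩
  | succ m ih =>
    obtain ⟨ih1, ih2⟩ := ih (by omega)
    have hsplit : PySem.List.pyRange 0 ((m + 1 : Nat) : Int) 1
        = PySem.List.pyRange 0 ((m : Nat) : Int) 1 ++ [(m : Int)] := by
      rw [show ((m + 1 : Nat) : Int) = (m : Int) + 1 by push_cast; ring]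
      exact PySem.List.pyRange_one_succ_right (by omega)
    rw [hsplit, List.flatMap_append, List.foldl_append]
    simp only [List.flatMap_cons, List.flatMap_nil, List.append_nil]
    set res := (((PySem.List.pyRange 0 ((m : Nat) : Int) 1).flatMap
        (fun ii => (PySem.List.pyRange 0 ((n2 : Int) + 1) 1).map (fun j => (ii, j)))).foldl
        (pvStepA s1 s2 iw sw) (PySem.Dict.empty, ((0 : Int), (0 : Int)))) with hres
    have hrow := pv_rowA_aux s1 s2 iw sw n2 m res.1 res.2
      (fun hm1 j' hj' => ih2 (m - 1) (by omega) j' hj')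
      (n2 + 1) (le_refl _)
    rw [show ((n2 + 1 : Nat) : Int) = (n2 : Int) + 1 by push_cast; ring] at hrow
    obtain ⟨hr1, hr2, hr3⟩ := hrow
    rw [show res = (res.1, res.2) from rfl]
    constructor
    · intro _
      rw [hr1]
      simp
    · intro i' hi' j hj
      by_cases him : i' = m
      · subst him
        exact hr2 j (by omega)
      · rw [hr3 ((i' : Int), (j : Int)) (by simp only []; exact_mod_cast fun h => absurd (by exact_mod_cast h : i' = m) him)]
        exact ih2 i' (by omega) j hj

-- A's traceback from (i, j) emits exactly the chain of the chosen path.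
theorem pv_traceA_chain (s1 s2 : String) (iw sw : Int) (n1 n2 : Nat)
    (dist : PySem.Dict (Int × Int) ((Int × Int) × Int))
    (hd : ∀ i ≤ n1, ∀ j ≤ n2, dist.get? ((i : Int), (j : Int)) = some (pvSpecCell s1 s2 iw sw i j))
    (fuel : Nat) : ∀ (i j : Nat), i ≤ n1 → j ≤ n2 → i + j ≤ fuel →
    pvTraceA s1 s2 dist fuel ((i : Int), (j : Int))
      = ((pvChain s1 s2 iw sw i j).map Prod.fst, (pvChain s1 s2 iw sw i j).map Prod.snd) := by
  induction fuel with
  | zero =>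
    intro i j hi hj hf
    have hi0 : i = 0 := by omega
    have hj0 : j = 0 := by omega
    subst hi0; subst hj0
    simp [pvTraceA, pvChain]
  | succ fuel ih =>
    intro i j hi hj hfuel
    have hgetD : dist.getD ((i : Int), (j : Int)) ((0, 0), 0) = pvSpecCell s1 s2 iw sw i j := by
      rw [PySem.Dict.getD_eq_get?_getD, hd i hi j hj]; rfl
    rcases i with _ | i <;> rcases j with _ | j
    · simp [pvTraceA, pvChain]
    · have hne : ¬(((0 : Nat) : Int), ((j + 1 : Nat) : Int)) = ((0 : Int), (0 : Int)) := by
        simp; omega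
      rw [pvTraceA, if_neg hne, hgetD]
      have harr : pvSpecCell s1 s2 iw sw 0 (j + 1) = ((0, (j : Int)), pvD s1 s2 iw sw 0 (j + 1)) := rfl
      rw [harr]
      dsimp only
      have hA1 : ¬((0 : Int) ≠ ((0 : Nat) : Int) ∧ ((j : Nat) : Int) ≠ ((j + 1 : Nat) : Int)) := by
        rintro ⟨hc, -⟩; simp at hc
      have hA2 : ¬((0 : Int) ≠ ((0 : Nat) : Int)) := by simp
      rw [if_neg hA1, if_neg hA2]
      have hIH := ih 0 j (by omega) (by omega) (by omega)
      simp only [Nat.cast_zero] at hIH ⊢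
      rw [hIH,
        show pvChain s1 s2 iw sw 0 (j + 1) = ('-', pvS1 s2 j) :: pvChain s1 s2 iw sw 0 j from by
          simp [pvChain]]
      rfl
    · have hne : ¬(((i + 1 : Nat) : Int), ((0 : Nat) : Int)) = ((0 : Int), (0 : Int)) := by
        simp; omega
      rw [pvTraceA, if_neg hne, hgetD]
      have harr : pvSpecCell s1 s2 iw sw (i + 1) 0 = (((i : Int), 0), pvD s1 s2 iw sw (i + 1) 0) := rfl
      rw [harr]
      dsimp only
      have hA1 : ¬(((i : Nat) : Int) ≠ ((i + 1 : Nat) : Int) ∧ (0 : Int) ≠ ((0 : Nat) : Int)) := by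
        rintro ⟨-, hc⟩; simp at hc
      have hA2 : ((i : Nat) : Int) ≠ ((i + 1 : Nat) : Int) := by push_cast; omega
      rw [if_neg hA1, if_pos hA2]
      have hIH := ih i 0 (by omega) (by omega) (by omega)
      simp only [Nat.cast_zero] at hIH ⊢
      rw [hIH,
        show pvChain s1 s2 iw sw (i + 1) 0 = (pvS1 s1 i, '-') :: pvChain s1 s2 iw sw i 0 from by
          simp [pvChain]]
      rfl
    · have hne : ¬(((i + 1 : Nat) : Int), ((j + 1 : Nat) : Int)) = ((0 : Int), (0 : Int)) := by
        simp; omega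
      have ei : ((i : Int) + 1) = ((i + 1 : Nat) : Int) := by push_cast; ring
      have ej : ((j : Int) + 1) = ((j + 1 : Nat) : Int) := by push_cast; ring
      by_cases h1 : iw + pvD s1 s2 iw sw i (j + 1) = pvD s1 s2 iw sw (i + 1) (j + 1)
      · have harr : pvSpecCell s1 s2 iw sw (i + 1) (j + 1)
            = (((i : Int), (j : Int) + 1), pvD s1 s2 iw sw (i + 1) (j + 1)) := by
          simp only [pvSpecCell, pvArrow]
          rw [if_pos h1]
        have hch : pvChain s1 s2 iw sw (i + 1) (j + 1)
            = (pvS1 s1 i, '-') :: pvChain s1 s2 iw sw i (j + 1) := by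
          simp only [pvChain]
          rw [if_pos h1]
        rw [pvTraceA, if_neg hne, hgetD, harr, hch]
        dsimp only
        have hA1 : ¬(((i : Nat) : Int) ≠ ((i + 1 : Nat) : Int) ∧ ((j : Int) + 1) ≠ ((j + 1 : Nat) : Int)) := by
          rintro ⟨-, hc⟩; exact hc ej
        have hA2 : ((i : Nat) : Int) ≠ ((i + 1 : Nat) : Int) := by push_cast; omega
        rw [if_neg hA1, if_pos hA2, ej]
        rw [ih i (j + 1) (by omega) hj (by omega)]
        rfl
      · by_cases h2 : iw + pvD s1 s2 iw sw (i + 1) j = pvD s1 s2 iw sw (i + 1) (j + 1)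
        · have harr : pvSpecCell s1 s2 iw sw (i + 1) (j + 1)
              = ((((i : Int) + 1), (j : Int)), pvD s1 s2 iw sw (i + 1) (j + 1)) := by
            simp only [pvSpecCell, pvArrow]
            rw [if_neg h1, if_pos h2]
          have hch : pvChain s1 s2 iw sw (i + 1) (j + 1)
              = ('-', pvS1 s2 j) :: pvChain s1 s2 iw sw (i + 1) j := by
            simp only [pvChain]
            rw [if_neg h1, if_pos h2]
          rw [pvTraceA, if_neg hne, hgetD, harr, hch]
          dsimp only
          have hA1 : ¬(((i : Int) + 1) ≠ ((i + 1 : Nat) : Int) ∧ ((j : Nat) : Int) ≠ ((j + 1 : Nat) : Int)) := by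
            rintro ⟨hc, -⟩; exact hc ei
          have hA2 : ¬(((i : Int) + 1) ≠ ((i + 1 : Nat) : Int)) := by
            intro hc; exact hc ei
          rw [if_neg hA1, if_neg hA2, ei]
          rw [ih (i + 1) j hi (by omega) (by omega)]
          rfl
        · have harr : pvSpecCell s1 s2 iw sw (i + 1) (j + 1)
              = (((i : Int), (j : Int)), pvD s1 s2 iw sw (i + 1) (j + 1)) := by
            simp only [pvSpecCell, pvArrow]
            rw [if_neg h1, if_neg h2]
          have hch : pvChain s1 s2 iw sw (i + 1) (j + 1)
              = (pvS1 s1 i, pvS1 s2 j) :: pvChain s1 s2 iw sw i j := by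
            simp only [pvChain]
            rw [if_neg h1, if_neg h2]
          rw [pvTraceA, if_neg hne, hgetD, harr, hch]
          dsimp only
          have hA1 : ((i : Nat) : Int) ≠ ((i + 1 : Nat) : Int) ∧ ((j : Nat) : Int) ≠ ((j + 1 : Nat) : Int) := by
            constructor <;> (push_cast; omega)
          rw [if_pos hA1]
          rw [ih i j (by omega) (by omega) (by omega)]
          rfl

-- ===== VERDICT (by name: the statement is the Claim_ definition above) =====
theorem edit_matrix_spec : Claim_equal_edit_matrix := by
  intro s1 s2 iw sw _
  unfold Spec_edit_matrix edit_matrix edit_matrix_alt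
  dsimp only
  have hc1 : PySem.Str.len s1 + 1 = ((s1.toList.length + 1 : Nat) : Int) := by
    rw [PySem.Str.len_eq]; push_cast; ring
  have hc2' : PySem.Str.len s2 + 1 = ((s2.toList.length : Nat) : Int) + 1 := by
    rw [PySem.Str.len_eq]
  rw [pv_foldB_spec s1 s2 iw sw (s1.toList.length) (s2.toList.length) rfl rfl]
  rw [hc1, hc2']
  obtain ⟨hv, hget⟩ := pv_foldA_aux s1 s2 iw sw (s1.toList.length) (s2.toList.length)
    (s1.toList.length + 1) (le_refl _)
  set res := (((PySem.List.pyRange 0 ((s1.toList.length + 1 : Nat) : Int) 1).flatMap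
      (fun ii => (PySem.List.pyRange 0 (((s2.toList.length : Nat) : Int) + 1) 1).map (fun j => (ii, j)))).foldl
      (pvStepA s1 s2 iw sw) (PySem.Dict.empty, ((0 : Int), (0 : Int)))) with hres
  have hv' := hv (by omega)
  simp only [Nat.add_sub_cancel] at hv'
  have htr := pv_traceA_chain s1 s2 iw sw (s1.toList.length) (s2.toList.length) res.1
    (fun i hi j hj => hget i (by omega) j hj)
    (s1.toList.length + s2.toList.length)
    (s1.toList.length) (s2.toList.length) (le_refl _) (le_refl _) (le_refl _)
  have hget' := hget (s1.toList.length) (by omega) (s2.toList.length) (le_refl _)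
  have hlast : (PySem.List.pyGet?
      ((List.range (s2.toList.length + 1)).map (fun j => pvCell s1 s2 iw sw (s1.toList.length) j)) (-1)).getD (0, [])
      = pvCell s1 s2 iw sw (s1.toList.length) (s2.toList.length) := by
    rw [show List.range (s2.toList.length + 1) = List.range (s2.toList.length) ++ [s2.toList.length] from
      List.range_succ, List.map_append]
    simp [PySem.List.pyGet?_neg_one_append_singleton]
  rw [hlast]
  rw [hv', htr, PySem.Dict.getD_eq_get?_getD, hget']
  unfold pvCell
  rw [pv_walkB_spec]
  rfl
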